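-- pv_equiv track=rewrite | github.com/emmtrix/emx-pytorch2c | scripts/list_aten_ops.py | _summarize_ops
-- ===== SOURCE A (Python) =====
-- from typing import Iterable, Set
--
-- def _summarize_ops(aten_ops: Iterable[str], codegen_ops: Set[str]) -> tuple[int, int]:
--     total = 0
--     codegen_only = 0
--     for op_name in aten_ops:
--         total += 1
--         if op_name in codegen_ops:
--             codegen_only += 1
--     return total, codegen_only
-- ===== SOURCE B (Python) =====
-- def _summarize_ops(aten_ops, codegen_ops):
--     counts = {}
--     for op in aten_ops:
--         counts[op] = counts.get(op, 0) + 1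
--     total = sum(counts.values())
--     codegen_only = sum(n for name, n in counts.items() if name in codegen_ops)
--     return total, codegen_only
-- ===== Notes on version B (the rewrite author's own statement) =====
-- stated objective: alternative
-- what changed: Builds a frequency dictionary of op names in one grouping pass, then derives the total as the sum of all frequencies and the codegen count by membership-testing each DISTINCT name once and summing its frequency, instead of A's fused per-element two-counter loop.
import Mathlib
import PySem

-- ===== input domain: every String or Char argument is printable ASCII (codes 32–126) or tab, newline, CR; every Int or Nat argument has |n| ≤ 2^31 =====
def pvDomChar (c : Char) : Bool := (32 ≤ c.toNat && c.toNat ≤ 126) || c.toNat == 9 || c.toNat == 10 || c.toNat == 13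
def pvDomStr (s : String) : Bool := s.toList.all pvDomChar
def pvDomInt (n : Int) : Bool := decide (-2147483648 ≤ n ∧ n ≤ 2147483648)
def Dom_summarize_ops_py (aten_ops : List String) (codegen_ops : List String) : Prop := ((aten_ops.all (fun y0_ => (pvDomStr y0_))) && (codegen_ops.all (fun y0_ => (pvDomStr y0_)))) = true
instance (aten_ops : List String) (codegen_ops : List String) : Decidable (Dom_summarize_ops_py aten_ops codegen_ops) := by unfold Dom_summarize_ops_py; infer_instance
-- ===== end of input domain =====

-- ===== PORT A =====
-- A: one fused pass over aten_ops, incrementing both counters per element.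
def summarize_ops_py (aten_ops : List String) (codegen_ops : List String) : Int × Int :=
  aten_ops.foldl
    (fun (acc : Int × Int) op_name =>
      (acc.1 + 1, if op_name ∈ codegen_ops then acc.2 + 1 else acc.2))
    (0, 0)

-- ===== PORT B =====
-- B: build a frequency dict of op names, then total = sum of frequencies and
-- codegen count = sum of frequencies of the distinct names found in codegen_ops
-- (return value only; one line, a different decomposition via a grouping map).
def summarize_ops_py_alt (aten_ops : List String) (codegen_ops : List String) : Int × Int :=
  let counts : PySem.Dict String Int :=
    aten_ops.foldl (fun d op => d.modify op 0 (· + 1)) PySem.Dict.empty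
  let total := counts.values.foldl (fun acc n => acc + n) 0
  let codegen_only :=
    counts.items.foldl
      (fun acc p => if p.1 ∈ codegen_ops then acc + p.2 else acc) 0
  (total, codegen_only)

-- ===== PRECONDITION & SPEC =====
def Spec_summarize_ops_py (aten_ops : List String) (codegen_ops : List String) (out : Int × Int) : Prop := out = summarize_ops_py_alt aten_ops codegen_ops
instance (aten_ops : List String) (codegen_ops : List String) (out : Int × Int) : Decidable (Spec_summarize_ops_py aten_ops codegen_ops out) := by unfold Spec_summarize_ops_py; infer_instance

-- ===== CLAIM (what is proved, stated in full; the proofs are below) =====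
def Claim_equal_summarize_ops_py : Prop := ∀ (aten_ops : List String) (codegen_ops : List String), Dom_summarize_ops_py aten_ops codegen_ops → Spec_summarize_ops_py aten_ops codegen_ops (summarize_ops_py aten_ops codegen_ops)

-- ===== LEMMAS AND PROOFS =====

-- A's fused fold computes (length, number of elements in codegen_ops).
theorem fold_eq (codegen_ops : List String) (aten_ops : List String) (t c : Int) :
    aten_ops.foldl
      (fun (acc : Int × Int) op_name =>
        (acc.1 + 1, if op_name ∈ codegen_ops then acc.2 + 1 else acc.2))
      (t, c)
    = (t + aten_ops.length,
       c + (aten_ops.filter (fun op => decide (op ∈ codegen_ops))).length) := by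
  induction aten_ops generalizing t c with
  | nil => simp
  | cons x xs ih =>
    simp only [List.foldl_cons, List.filter_cons, ih]
    by_cases h : x ∈ codegen_ops <;> simp [h] <;> omega

-- Indicator sum over a nodup list containing x.
theorem sum_indicator (p : String → Prop) [DecidablePred p] (d : List String) (x : String)
    (hnd : d.Nodup) (hx : x ∈ d) :
    (d.map (fun k => if p k then (if k = x then (1 : Int) else 0) else 0)).sum
      = if p x then 1 else 0 := by
  induction d with
  | nil => cases hx
  | cons a rest ih =>
    obtain ⟨hna, hndr⟩ := List.nodup_cons.mp hnd
    simp only [List.map_cons, List.sum_cons]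
    rcases List.mem_cons.mp hx with h | h
    · subst h
      have hz : (rest.map (fun k => if p k then (if k = x then (1 : Int) else 0) else 0)).sum = 0 := by
        apply List.sum_eq_zero
        intro y hy
        rcases List.mem_map.mp hy with ⟨k, hk, rfl⟩
        have hka : k ≠ x := fun he => hna (he ▸ hk)
        simp [hka]
      rw [hz]
      simp
    · have hax : a ≠ x := fun he => hna (he ▸ h)
      rw [ih hndr h]
      simp [hax]

-- Sum of (filtered) counts over a nodup superlist of xs = length of the filtered xs.
theorem sum_counts (p : String → Prop) [DecidablePred p] (xs d : List String)
    (hnd : d.Nodup) (hsub : ∀ x ∈ xs, x ∈ d) :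
    (d.map (fun k => if p k then (xs.count k : Int) else 0)).sum
      = ((xs.filter (fun x => decide (p x))).length : Int) := by
  induction xs with
  | nil => simp [List.sum_eq_zero]
  | cons x t ih =>
    have hxd : x ∈ d := hsub x List.mem_cons_self
    have htd : ∀ y ∈ t, y ∈ d := fun y hy => hsub y (List.mem_cons_of_mem _ hy)
    have hsplit :
        (d.map (fun k => if p k then ((x :: t).count k : Int) else 0)).sum
          = (d.map (fun k => if p k then (t.count k : Int) else 0)).sum
            + (d.map (fun k => if p k then (if k = x then (1 : Int) else 0) else 0)).sum := by
      rw [← List.sum_map_add]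
      apply congrArg List.sum
      apply List.map_congr_left
      intro k hk
      by_cases hp : p k
      · by_cases hkx : k = x
        · subst hkx
          simp only [hp, if_true, List.count_cons_self]
          push_cast
          omega
        · have hxk : x ≠ k := fun he => hkx he.symm
          simp [hp, hkx, hxk]
      · simp [hp]
    rw [hsplit, ih htd, sum_indicator p d x hnd hxd, List.filter_cons]
    by_cases hp : p x <;> simp [hp]

-- 'if q x: acc += g x' fold = sum of an if-map.
theorem foldl_if_add {α : Type} (q : α → Prop) [DecidablePred q] (g : α → Int)
    (l : List α) (a : Int) :
    l.foldl (fun acc x => if q x then acc + g x else acc) a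
      = a + (l.map (fun x => if q x then g x else 0)).sum := by
  induction l generalizing a with
  | nil => simp
  | cons x t ih =>
    simp only [List.foldl_cons, List.map_cons, List.sum_cons, ih]
    by_cases hq : q x <;> simp [hq, add_assoc]

theorem summarize_ops_py_spec : Claim_equal_summarize_ops_py := by
  intro aten_ops codegen_ops _
  unfold Spec_summarize_ops_py summarize_ops_py summarize_ops_py_alt
  rw [fold_eq, ← PySem.Dict.counter_eq_foldl]
  have hitems := PySem.Dict.items_counter (xs := aten_ops)
  have hnd : (PySem.Set.ofList aten_ops).Nodup := PySem.Set.nodup_ofList aten_ops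
  have hsub : ∀ x ∈ aten_ops, x ∈ PySem.Set.ofList aten_ops := by
    intro x hx; rw [PySem.Set.mem_ofList]; exact hx
  have htotal :
      ((PySem.Dict.counter aten_ops).values.foldl (fun acc n => acc + n) 0 : Int)
        = (aten_ops.length : Int) := by
    rw [PySem.List.foldl_add (g := fun n => n)]
    have hv : (PySem.Dict.counter aten_ops).values
        = (PySem.Set.ofList aten_ops).map (fun k => (aten_ops.count k : Int)) := by
      simp [PySem.Dict.values, hitems, List.map_map, Function.comp]
    rw [hv, List.map_id']
    have h := sum_counts (fun _ => True) aten_ops (PySem.Set.ofList aten_ops) hnd hsub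
    simpa using h
  have hcg :
      ((PySem.Dict.counter aten_ops).items.foldl
        (fun acc p => if p.1 ∈ codegen_ops then acc + p.2 else acc) 0 : Int)
        = ((aten_ops.filter (fun op => decide (op ∈ codegen_ops))).length : Int) := by
    rw [hitems, foldl_if_add (fun p : String × Int => p.1 ∈ codegen_ops) (fun p => p.2)]
    rw [← sum_counts (fun k => k ∈ codegen_ops) aten_ops (PySem.Set.ofList aten_ops) hnd hsub]
    simp [List.map_map, Function.comp_def]
  simp only [htotal, hcg]
  simp
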